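-- pv_equiv track=rewrite | github.com/art-kors/document-formatter | app/agents/structure_agent/checks.py | _is_valid_transition
-- ===== SOURCE A (Python) =====
-- from typing import Dict, List, Optional, Tuple
--
-- def _is_valid_transition(previous: Tuple[int, ...], current: Tuple[int, ...]) -> bool:
--     if current == previous:
--         return False
--
--     if len(current) == len(previous) + 1 and current[:-1] == previous and current[-1] == 1:
--         return True
--
--     if len(current) == len(previous) and current[:-1] == previous[:-1] and current[-1] == previous[-1] + 1:
--         return True
--
--     for depth in range(len(previous) - 1, -1, -1):
--         candidate = previous[:depth] + (previous[depth] + 1,)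
--         if current == candidate:
--             return True
--
--     return False
-- ===== SOURCE B (Python) =====
-- def _is_valid_transition(previous, current):
--     if not current:
--         return False
--     k = len(current) - 1
--     if k > len(previous):
--         return False
--     if current[:k] != previous[:k]:
--         return False
--     if k == len(previous):
--         return current[k] == 1
--     return current[k] == previous[k] + 1
-- ===== Notes on version B (the rewrite author's own statement) =====
-- stated objective: faster
-- what changed: Replaces A's guard cascade and descending loop that materialises every candidate tuple previous[:d]+(previous[d]+1,) by a direct shape analysis of current: one prefix comparison against previous plus a single last-element check, with no candidate construction at all.
import Mathlib
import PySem

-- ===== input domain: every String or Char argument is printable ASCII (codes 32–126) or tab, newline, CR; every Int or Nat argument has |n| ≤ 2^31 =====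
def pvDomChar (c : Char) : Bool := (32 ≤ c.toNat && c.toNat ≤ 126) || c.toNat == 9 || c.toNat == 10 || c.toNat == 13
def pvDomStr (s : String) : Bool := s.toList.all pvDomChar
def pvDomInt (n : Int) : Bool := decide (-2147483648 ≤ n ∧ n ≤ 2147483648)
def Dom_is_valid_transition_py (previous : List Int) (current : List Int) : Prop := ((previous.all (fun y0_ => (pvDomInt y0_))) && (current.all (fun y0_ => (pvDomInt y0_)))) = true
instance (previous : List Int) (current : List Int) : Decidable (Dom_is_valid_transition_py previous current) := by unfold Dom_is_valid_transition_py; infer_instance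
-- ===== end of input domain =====

-- B replaces A's guard cascade and descending candidate loop by a direct shape analysis
-- of `current` (prefix comparison plus one last-element check); objective: faster/simpler.


-- ===== PORT A =====
def is_valid_transition_py (previous : List Int) (current : List Int) : Bool :=
  if current == previous then false
  else if (current.length == previous.length + 1)
          && (PySem.List.slice current none (some (-1)) == previous)
          && (PySem.List.pyGet? current (-1) == some 1) then true
  else if (current.length == previous.length)
          && (PySem.List.slice current none (some (-1)) == PySem.List.slice previous none (some (-1)))
          && (PySem.List.pyGet? current (-1) == (PySem.List.pyGet? previous (-1)).map (· + 1)) then true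
  else
    -- for depth in range(len(previous)-1, -1, -1): early-return True on match = any
    (PySem.List.pyRange ((previous.length : Int) - 1) (-1) (-1)).any (fun depth =>
      current == PySem.List.slice previous none (some depth) ++ [PySem.List.pyGetD previous depth 0 + 1])

-- ===== PORT B =====
-- (Source B's local name k = len(current) - 1 is inlined as current.length - 1)
def is_valid_transition_py_alt (previous : List Int) (current : List Int) : Bool :=
  if current == [] then false
  else if current.length - 1 > previous.length then false
  else if !(current.take (current.length - 1) == previous.take (current.length - 1)) then false
  else if current.length - 1 == previous.length then current.getD (current.length - 1) 0 == 1
  else current.getD (current.length - 1) 0 == previous.getD (current.length - 1) 0 + 1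

-- ===== PRECONDITION & SPEC =====
def Spec_is_valid_transition_py (previous : List Int) (current : List Int) (out : Bool) : Prop := out = is_valid_transition_py_alt previous current
instance (previous : List Int) (current : List Int) (out : Bool) : Decidable (Spec_is_valid_transition_py previous current out) := by unfold Spec_is_valid_transition_py; infer_instance

-- ===== CLAIM (what is proved, stated in full; the proofs are below) =====
def Claim_equal_is_valid_transition_py : Prop := ∀ (previous : List Int) (current : List Int), Dom_is_valid_transition_py previous current → Spec_is_valid_transition_py previous current (is_valid_transition_py previous current)

-- ===== LEMMAS AND PROOFS =====

-- canonical description of "current is a valid successor of previous"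
def IsSucc (p c : List Int) : Prop :=
  c = p ++ [1] ∨ ∃ d : Nat, d < p.length ∧ c = p.take d ++ [p.getD d 0 + 1]

lemma getD_last_eq_getLast (c : List Int) (hcne : c ≠ []) :
    c.getD (c.length - 1) 0 = c.getLast hcne := by
  rw [List.getD_eq_getElem c 0 (by have := List.length_pos_of_ne_nil hcne; omega)]
  exact (List.getLast_eq_getElem hcne).symm

lemma alt_iff (p c : List Int) :
    is_valid_transition_py_alt p c = true ↔ IsSucc p c := by
  unfold is_valid_transition_py_alt IsSucc
  constructor
  · intro h
    split_ifs at h with hnil hgt hpre hlen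
    · -- child case: current.length - 1 = previous.length, last element 1
      left
      have hcne : c ≠ [] := by simpa using hnil
      have hpos := List.length_pos_of_ne_nil hcne
      simp only [beq_iff_eq] at h hlen
      simp only [Bool.not_eq_eq_eq_not, Bool.not_true, beq_eq_false_iff_ne, ne_eq,
        Decidable.not_not] at hpre
      rw [hlen, List.take_length] at hpre
      rw [getD_last_eq_getLast c hcne] at h
      have hdl : c.take (c.length - 1) = c.dropLast := (List.dropLast_eq_take (l := c)).symm
      rw [hlen] at hdl
      calc c = c.dropLast ++ [c.getLast hcne] := (List.dropLast_concat_getLast hcne).symm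
        _ = p ++ [1] := by rw [← hdl, hpre, h]
    · -- candidate case: depth = current.length - 1 < previous.length
      right
      have hcne : c ≠ [] := by simpa using hnil
      have hpos := List.length_pos_of_ne_nil hcne
      simp only [beq_iff_eq] at h hlen
      simp only [Bool.not_eq_eq_eq_not, Bool.not_true, beq_eq_false_iff_ne, ne_eq,
        Decidable.not_not] at hpre
      refine ⟨c.length - 1, by omega, ?_⟩
      rw [getD_last_eq_getLast c hcne] at h
      have hdl : c.take (c.length - 1) = c.dropLast := (List.dropLast_eq_take (l := c)).symm
      calc c = c.dropLast ++ [c.getLast hcne] := (List.dropLast_concat_getLast hcne).symm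
        _ = p.take (c.length - 1) ++ [p.getD (c.length - 1) 0 + 1] := by
            rw [← hdl, hpre, h]
  · intro h
    rcases h with h | ⟨d, hd, h⟩
    · subst h
      have hk : (p ++ [1]).length - 1 = p.length := by simp
      split_ifs with hnil hgt hpre hlen
      · simp at hnil
      · rw [hk] at hgt; omega
      · exfalso
        rw [hk, List.take_append_of_le_length (le_refl p.length), List.take_length] at hpre
        simp at hpre
      · rw [hk, List.getD_append_right p [1] 0 p.length (le_refl p.length)]
        simp
      · exfalso; rw [hk] at hlen; simp at hlen
    · subst h
      have hlt : d ≤ p.length := hd.le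
      have hl : (p.take d).length = d := by simp [Nat.min_eq_left hlt]
      have hk : (p.take d ++ [p.getD d 0 + 1]).length - 1 = d := by simp [hl]
      split_ifs with hnil hgt hpre hlen
      · simp at hnil
      · rw [hk] at hgt; omega
      · exfalso
        rw [hk, List.take_append_of_le_length (by omega), List.take_take] at hpre
        simp at hpre
      · exfalso; rw [hk] at hlen; simp at hlen; omega
      · rw [hk, List.getD_append_right (p.take d) [p.getD d 0 + 1] 0 d (by omega)]
        simp [hl]

lemma isSucc_ne_self (p c : List Int) (h : IsSucc p c) : c ≠ p := by
  rcases h with h | ⟨d, hd, h⟩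
  · subst h; intro he
    have := congrArg List.length he
    simp at this
  · intro he
    rw [he] at h
    have h1 : p.length = d + 1 := by
      have := congrArg List.length h
      simp [Nat.min_eq_left hd.le] at this
      omega
    have h2 := List.getElem_of_eq h hd
    rw [List.getElem_append_right (by simp [Nat.min_eq_left hd.le])] at h2
    simp [Nat.min_eq_left hd.le] at h2
    simp [List.getElem?_eq_getElem hd] at h2

lemma A_iff (p c : List Int) :
    is_valid_transition_py p c = true ↔ IsSucc p c := by
  constructor
  · intro h
    unfold is_valid_transition_py at h
    split_ifs at h with h0 h1 h2
    · -- child branch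
      simp only [Bool.and_eq_true, beq_iff_eq, PySem.List.slice_to_neg_one,
        PySem.List.pyGet?_neg_one] at h1
      obtain ⟨⟨hlen, hdrop⟩, hlast⟩ := h1
      left
      have hne : c ≠ [] := by intro he; simp [he] at hlen
      have := List.dropLast_concat_getLast hne
      rw [List.getLast?_eq_some_getLast hne] at hlast
      simp at hlast
      rw [← this, hdrop, hlast]
    · -- sibling branch
      simp only [Bool.and_eq_true, beq_iff_eq, PySem.List.slice_to_neg_one,
        PySem.List.pyGet?_neg_one] at h2
      obtain ⟨⟨hlen, hdrop⟩, hlast⟩ := h2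
      right
      have hne0 : c ≠ p := by simpa using h0
      have hpne : p ≠ [] := by
        intro he
        subst he
        simp at hlen
        exact hne0 hlen
      have hcne : c ≠ [] := by
        intro he; subst he; simp at hlen
        exact hpne (List.eq_nil_of_length_eq_zero hlen.symm)
      refine ⟨p.length - 1, by have := List.length_pos_of_ne_nil hpne; omega, ?_⟩
      rw [List.getLast?_eq_some_getLast hcne, List.getLast?_eq_some_getLast hpne] at hlast
      simp at hlast
      have hgd : p.getD (p.length - 1) 0 = p.getLast hpne := by
        rw [List.getD_eq_getElem p 0 (by have := List.length_pos_of_ne_nil hpne; omega)]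
        exact (List.getLast_eq_getElem hpne).symm
      rw [hgd, ← List.dropLast_eq_take, ← hdrop, ← hlast]
      exact (List.dropLast_concat_getLast hcne).symm
    · -- loop
      simp only [List.any_eq_true, beq_iff_eq] at h
      obtain ⟨depth, hmem, heq⟩ := h
      rw [PySem.List.mem_pyRange_neg_one] at hmem
      obtain ⟨hlo, hhi⟩ := hmem
      right
      refine ⟨depth.toNat, by omega, ?_⟩
      have hdt : depth = (depth.toNat : Int) := by omega
      rw [hdt] at heq
      rw [PySem.List.slice_to_natCast, PySem.List.pyGetD_natCast] at heq
      exact heq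
  · intro h
    have hne := isSucc_ne_self p c h
    unfold is_valid_transition_py
    split_ifs with h0 h1 h2
    · exfalso; exact hne (by simpa using h0)
    · rfl
    · rfl
    · -- both guards false: show the loop finds the candidate
      rcases h with h | ⟨d, hd, h⟩
      · exfalso
        apply h1
        subst h
        simp [PySem.List.slice_to_neg_one, PySem.List.pyGet?_neg_one_append_singleton]
      · simp only [List.any_eq_true, beq_iff_eq]
        refine ⟨(d : Int), ?_, ?_⟩
        · rw [PySem.List.mem_pyRange_neg_one]; omega
        · rw [PySem.List.slice_to_natCast, PySem.List.pyGetD_natCast]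
          exact h

-- ===== VERDICT (by name: the statement is the Claim_ definition above) =====
theorem is_valid_transition_py_spec : Claim_equal_is_valid_transition_py := by
  intro p c _
  unfold Spec_is_valid_transition_py
  rw [Bool.eq_iff_iff, A_iff, alt_iff]
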